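-- pv_equiv track=rewrite | github.com/rishasrinivas/Whole-Exome-Sequencing | generate_report.py | _extract_clinical_significance
-- ===== SOURCE A (Python) =====
-- def _extract_clinical_significance(annotations):
--     """Extract clinical significance from ClinVar annotations"""
--     clinical_significances = []
--
--     for annotation in annotations:
--         clin_sig = annotation.get('CLIN_SIG', '')
--         if clin_sig:
--             clinical_significances.append(clin_sig)
--
--     # Return the most significant classification
--     priority = ['pathogenic', 'likely_pathogenic', 'uncertain_significance',
--                'likely_benign', 'benign']
--
--     for sig in priority:
--         if any(sig.replace('_', ' ') in cs.lower() for cs in clinical_significances):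
--             return sig.replace('_', ' ').title()
--
--     return 'Unknown' if clinical_significances else None
-- ===== SOURCE B (Python) =====
-- _PRIORITY = [('pathogenic', 'Pathogenic'),
--              ('likely pathogenic', 'Likely Pathogenic'),
--              ('uncertain significance', 'Uncertain Significance'),
--              ('likely benign', 'Likely Benign'),
--              ('benign', 'Benign')]
--
--
-- def _extract_clinical_significance(annotations):
--     """Single pass: accumulate the minimum priority rank seen in any CLIN_SIG."""
--     best = None
--     saw_any = False
--     for annotation in annotations:
--         cs = annotation.get('CLIN_SIG', '')
--         if not cs:
--             continue
--         saw_any = True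
--         low = cs.lower()
--         for i, (phrase, _title) in enumerate(_PRIORITY):
--             if phrase in low:
--                 if best is None or i < best:
--                     best = i
--                 break
--     if best is not None:
--         return _PRIORITY[best][1]
--     return 'Unknown' if saw_any else None
-- ===== Notes on version B (the rewrite author's own statement) =====
-- stated objective: simpler
-- what changed: Replaced A's two-phase collect-then-scan (outer loop over the priority list with an inner any() over all collected strings) by a single pass over the annotations that keeps a running minimum priority rank (inner enumerate with break), then decodes the rank from a phrase/title table.
import Mathlib
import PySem

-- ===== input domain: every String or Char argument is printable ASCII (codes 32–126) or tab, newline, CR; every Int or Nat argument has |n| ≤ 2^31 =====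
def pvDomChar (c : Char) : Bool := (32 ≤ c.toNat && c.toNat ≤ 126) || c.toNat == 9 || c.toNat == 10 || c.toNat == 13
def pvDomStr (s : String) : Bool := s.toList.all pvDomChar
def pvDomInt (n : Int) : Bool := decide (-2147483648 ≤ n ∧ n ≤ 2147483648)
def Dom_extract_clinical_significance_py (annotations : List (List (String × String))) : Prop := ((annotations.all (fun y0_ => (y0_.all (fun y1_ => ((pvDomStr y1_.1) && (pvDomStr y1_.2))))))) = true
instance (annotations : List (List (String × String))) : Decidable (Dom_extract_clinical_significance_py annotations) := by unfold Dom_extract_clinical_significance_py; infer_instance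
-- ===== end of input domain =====

-- B replaces A's collect-then-scan (outer loop over the priority list, inner any() over all
-- collected strings) by one pass over the annotations that keeps a running minimum priority rank.

-- ===== PORT A =====
-- str.title(), ported by hand step for step: exact on ASCII input (a letter is uppercased
-- after a non-letter and lowercased otherwise); here it is only applied to ASCII phrases.
def pvTitleGo : List Char → Bool → List Char
  | [], _ => []
  | c :: rest, prevCased =>
    let cased := c.isAlpha
    (if cased then (if prevCased then PySem.Chars.lowerChar c else PySem.Chars.upperChar c) else c)
      :: pvTitleGo rest cased

def pvTitle (s : String) : String := String.ofList (pvTitleGo s.toList false)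

def pvPriority : List String :=
  ["pathogenic", "likely_pathogenic", "uncertain_significance", "likely_benign", "benign"]

-- the 'for sig in priority: if any(...): return ...' loop
def pvLoopA (css : List String) : List String → Option String
  | [] => none
  | sig :: rest =>
    if css.any (fun cs => PySem.Str.isIn (PySem.Str.replace sig "_" " ") (PySem.Str.lower cs)) then
      some (pvTitle (PySem.Str.replace sig "_" " "))
    else pvLoopA css rest

def extract_clinical_significance_py (annotations : List (List (String × String))) : Option String :=
  let css := annotations.foldl (fun acc ann =>
    let cs := (PySem.Dict.mk ann).getD "CLIN_SIG" ""
    if cs ≠ "" then acc ++ [cs] else acc) []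
  match pvLoopA css pvPriority with
  | some r => some r
  | none => if css ≠ [] then some "Unknown" else none

-- ===== PORT B =====
def pvTable : List (String × String) :=
  [("pathogenic", "Pathogenic"), ("likely pathogenic", "Likely Pathogenic"),
   ("uncertain significance", "Uncertain Significance"),
   ("likely benign", "Likely Benign"), ("benign", "Benign")]

-- one iteration of B's single pass; state = (best rank so far, saw_any)
def pvStepB (st : Option Nat × Bool) (ann : List (String × String)) : Option Nat × Bool :=
  if (PySem.Dict.mk ann).getD "CLIN_SIG" "" = "" then st
  else  -- low = cs.lower(); first i with PRIORITY[i].phrase in low, else None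
    match pvTable.findIdx? (fun p =>
        PySem.Str.isIn p.1 (PySem.Str.lower ((PySem.Dict.mk ann).getD "CLIN_SIG" ""))) with
    | none => (st.1, true)
    | some i => (some (match st.1 with | none => i | some b => min i b), true)

def extract_clinical_significance_py_alt (annotations : List (List (String × String))) : Option String :=
  let st := annotations.foldl pvStepB (none, false)
  match st.1 with
  | some b => some ((pvTable.getD b ("", "")).2)
  | none => if st.2 then some "Unknown" else none

-- ===== PRECONDITION & SPEC =====
def Spec_extract_clinical_significance_py (annotations : List (List (String × String))) (out : Option String) : Prop := out = extract_clinical_significance_py_alt annotations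
instance (annotations : List (List (String × String))) (out : Option String) : Decidable (Spec_extract_clinical_significance_py annotations out) := by unfold Spec_extract_clinical_significance_py; infer_instance

-- ===== CLAIM (what is proved, stated in full; the proofs are below) =====
def Claim_equal_extract_clinical_significance_py : Prop := ∀ (annotations : List (List (String × String))), Dom_extract_clinical_significance_py annotations → Spec_extract_clinical_significance_py annotations (extract_clinical_significance_py annotations)

-- ===== LEMMAS AND PROOFS =====

-- the CLIN_SIG value of an annotation
def pvSig (ann : List (String × String)) : String := (PySem.Dict.mk ann).getD "CLIN_SIG" ""

-- the non-empty CLIN_SIG strings, in order (A's first loop)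
def pvCss (annotations : List (List (String × String))) : List String :=
  (annotations.map pvSig).filter (· ≠ "")

lemma cssFold (annotations : List (List (String × String))) (acc : List String) :
    annotations.foldl (fun acc ann =>
      let cs := (PySem.Dict.mk ann).getD "CLIN_SIG" ""
      if cs ≠ "" then acc ++ [cs] else acc) acc = acc ++ pvCss annotations := by
  induction annotations generalizing acc with
  | nil => simp [pvCss]
  | cons a l ih =>
    simp only [List.foldl_cons, ih, pvCss, List.map_cons, pvSig]
    by_cases h : (PySem.Dict.mk a).getD "CLIN_SIG" "" = "" <;> simp [h]

-- rank of a single string: first priority phrase contained in its lowercase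
def pvRank (cs : String) : Option Nat :=
  pvTable.findIdx? (fun p => PySem.Str.isIn p.1 (PySem.Str.lower cs))

-- min on Option Nat, in B's orientation
def pvMinO : Option Nat → Option Nat → Option Nat
  | b, none => b
  | none, some i => some i
  | some k, some i => some (min i k)

lemma pvMinO_none_left (b : Option Nat) : pvMinO none b = b := by cases b <;> rfl

lemma pvMinO_assoc (a b c : Option Nat) : pvMinO (pvMinO a b) c = pvMinO a (pvMinO b c) := by
  cases a <;> cases b <;> cases c <;> simp [pvMinO]

def pvBest (css : List String) : Option Nat :=
  css.foldl (fun b cs => pvMinO b (pvRank cs)) none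

lemma pvBest_fold (css : List String) (b : Option Nat) :
    css.foldl (fun b cs => pvMinO b (pvRank cs)) b = pvMinO b (pvBest css) := by
  induction css generalizing b with
  | nil => cases b <;> rfl
  | cons c l ih =>
    rw [List.foldl_cons, ih]
    have hc : pvBest (c :: l) = pvMinO (pvRank c) (pvBest l) := by
      rw [pvBest, List.foldl_cons, ih, pvMinO_none_left]
    rw [hc, ← pvMinO_assoc]

lemma pvBest_cons (cs : String) (rest : List String) :
    pvBest (cs :: rest) = pvMinO (pvRank cs) (pvBest rest) := by
  rw [pvBest, List.foldl_cons, pvBest_fold, pvMinO_none_left]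

lemma pvStepB_eq (st : Option Nat × Bool) (ann : List (String × String)) :
    pvStepB st ann =
      if pvSig ann = "" then st else (pvMinO st.1 (pvRank (pvSig ann)), true) := by
  unfold pvStepB pvRank pvSig
  by_cases h : (PySem.Dict.mk ann).getD "CLIN_SIG" "" = ""
  · simp only [h, ite_true]
  · simp only [h, ite_false]
    cases hr : pvTable.findIdx? (fun p =>
        PySem.Str.isIn p.1 (PySem.Str.lower ((PySem.Dict.mk ann).getD "CLIN_SIG" ""))) with
    | none => cases hb : st.1 <;> simp [pvMinO]
    | some i => cases hb : st.1 <;> simp [pvMinO]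

-- B's fold characterised by pvBest / pvCss
lemma foldB (annotations : List (List (String × String))) (st : Option Nat × Bool) :
    annotations.foldl pvStepB st =
      (pvMinO st.1 (pvBest (pvCss annotations)), st.2 || !(pvCss annotations).isEmpty) := by
  induction annotations generalizing st with
  | nil => simp [pvCss, pvBest, pvMinO]
  | cons a l ih =>
    rw [List.foldl_cons, pvStepB_eq]
    have hcss : pvCss (a :: l) = if pvSig a = "" then pvCss l else pvSig a :: pvCss l := by
      by_cases h : pvSig a = "" <;> simp [pvCss, h]
    by_cases h : pvSig a = ""
    · rw [if_pos h] at hcss ⊢; rw [ih, hcss]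
    · rw [if_neg h] at hcss ⊢
      rw [ih, hcss, pvBest_cons, ← pvMinO_assoc]
      simp

-- the match flag A tests for one priority phrase
def pvM (phrase : String) (css : List String) : Bool :=
  css.any (fun cs => PySem.Str.isIn phrase (PySem.Str.lower cs))

-- A's priority chain as a function of the five match flags
def pvChain (css : List String) : Option Nat :=
  if pvM "pathogenic" css then some 0
  else if pvM "likely pathogenic" css then some 1
  else if pvM "uncertain significance" css then some 2
  else if pvM "likely benign" css then some 3
  else if pvM "benign" css then some 4
  else none

-- fold of pvMinO over a list of ranks
def pvFoldMin (rs : List (Option Nat)) : Option Nat := rs.foldl pvMinO none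

lemma pvFoldMin_from (rs : List (Option Nat)) (b : Option Nat) :
    rs.foldl pvMinO b = pvMinO b (pvFoldMin rs) := by
  induction rs generalizing b with
  | nil => cases b <;> rfl
  | cons r l ih =>
    rw [List.foldl_cons, ih]
    have hc : pvFoldMin (r :: l) = pvMinO r (pvFoldMin l) := by
      rw [pvFoldMin, List.foldl_cons, ih, pvMinO_none_left]
    rw [hc, ← pvMinO_assoc]

lemma pvFoldMin_cons (r : Option Nat) (l : List (Option Nat)) :
    pvFoldMin (r :: l) = pvMinO r (pvFoldMin l) := by
  rw [pvFoldMin, List.foldl_cons, pvFoldMin_from, pvMinO_none_left]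

lemma pvBest_eq_foldMin (css : List String) : pvBest css = pvFoldMin (css.map pvRank) := by
  rw [pvBest, pvFoldMin, List.foldl_map]

lemma pvFoldMin_none (rs : List (Option Nat)) (h : ∀ r ∈ rs, r = none) :
    pvFoldMin rs = none := by
  induction rs with
  | nil => rfl
  | cons r l ih =>
    rw [pvFoldMin_cons, h r (by simp), pvMinO_none_left]
    exact ih (fun r hr => h r (by simp [hr]))

lemma pvFoldMin_zero (rs : List (Option Nat)) (h : some 0 ∈ rs) : pvFoldMin rs = some 0 := by
  induction rs with
  | nil => simp at h
  | cons r l ih =>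
    rw [pvFoldMin_cons]
    rcases List.mem_cons.mp h with h0 | h0
    · subst h0
      cases hfl : pvFoldMin l <;> simp [pvMinO]
    · rw [ih h0]
      cases r <;> simp [pvMinO]

lemma pvMinO_map_succ (a b : Option Nat) :
    pvMinO (a.map (· + 1)) (b.map (· + 1)) = (pvMinO a b).map (· + 1) := by
  cases a <;> cases b <;> simp [pvMinO, Nat.succ_min_succ]

lemma pvFoldMin_map_succ (rs : List (Option Nat)) :
    pvFoldMin (rs.map (Option.map (· + 1))) = (pvFoldMin rs).map (· + 1) := by
  induction rs with
  | nil => rfl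
  | cons r l ih => rw [List.map_cons, pvFoldMin_cons, pvFoldMin_cons, ih, pvMinO_map_succ]

-- the first index of a table entry matched by SOME string is the minimum of the
-- per-string first indices
lemma findIdx_any (P : List (String × String)) (q : String × String → String → Bool)
    (css : List String) :
    P.findIdx? (fun a => css.any (fun cs => q a cs)) =
      pvFoldMin (css.map (fun cs => P.findIdx? (fun a => q a cs))) := by
  induction P with
  | nil =>
    rw [pvFoldMin_none]
    · simp
    · intro r hr
      rcases List.mem_map.mp hr with ⟨cs, _, hcs⟩
      simpa using hcs.symm
  | cons a P' ih =>
    rw [List.findIdx?_cons]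
    by_cases hA : (css.any fun cs => q a cs) = true
    · rw [if_pos hA]
      symm
      apply pvFoldMin_zero
      obtain ⟨cs, hmem, hq⟩ := List.any_eq_true.mp hA
      exact List.mem_map.mpr ⟨cs, hmem, by rw [List.findIdx?_cons, if_pos hq]⟩
    · rw [if_neg hA]
      have hall : ∀ cs ∈ css, q a cs = false := by
        intro cs hcs
        by_contra hne
        exact hA (List.any_eq_true.mpr ⟨cs, hcs, by revert hne; cases q a cs <;> simp⟩)
      have hmap : css.map (fun cs => (a :: P').findIdx? (fun x => q x cs)) =
          (css.map (fun cs => P'.findIdx? (fun x => q x cs))).map (Option.map (· + 1)) := by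
        rw [List.map_map]
        exact List.map_congr_left (fun cs hcs => by
          simp [List.findIdx?_cons, hall cs hcs])
      rw [hmap, pvFoldMin_map_succ, ih]

lemma best_eq_findIdx (css : List String) :
    pvBest css =
      pvTable.findIdx? (fun p => css.any (fun cs => PySem.Str.isIn p.1 (PySem.Str.lower cs))) := by
  rw [findIdx_any, pvBest_eq_foldMin]
  rfl

lemma chain_eq_findIdx (css : List String) :
    pvTable.findIdx? (fun p => css.any (fun cs => PySem.Str.isIn p.1 (PySem.Str.lower cs))) =
      pvChain css := by
  unfold pvTable pvChain pvM
  simp [List.findIdx?_cons]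
  split_ifs <;> rfl

lemma best_eq_chain (css : List String) : pvBest css = pvChain css :=
  (best_eq_findIdx css).trans (chain_eq_findIdx css)

lemma loopA_eq (css : List String) :
    pvLoopA css pvPriority =
      (pvChain css).map (fun b => (pvTable.getD b ("", "")).2) := by
  have e1 : PySem.Str.replace "pathogenic" "_" " " = "pathogenic" := by decide
  have e2 : PySem.Str.replace "likely_pathogenic" "_" " " = "likely pathogenic" := by decide
  have e3 : PySem.Str.replace "uncertain_significance" "_" " " = "uncertain significance" := by decide
  have e4 : PySem.Str.replace "likely_benign" "_" " " = "likely benign" := by decide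
  have e5 : PySem.Str.replace "benign" "_" " " = "benign" := by decide
  have t1 : pvTitle "pathogenic" = "Pathogenic" := by decide
  have t2 : pvTitle "likely pathogenic" = "Likely Pathogenic" := by decide
  have t3 : pvTitle "uncertain significance" = "Uncertain Significance" := by decide
  have t4 : pvTitle "likely benign" = "Likely Benign" := by decide
  have t5 : pvTitle "benign" = "Benign" := by decide
  simp only [pvPriority, pvLoopA, e1, e2, e3, e4, e5, t1, t2, t3, t4, t5,
    pvChain, pvM]
  split_ifs <;> rfl

-- ===== VERDICT (by name: the statement is the Claim_ definition above) =====
theorem extract_clinical_significance_py_spec : Claim_equal_extract_clinical_significance_py := by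
  intro annotations _
  unfold Spec_extract_clinical_significance_py
  unfold extract_clinical_significance_py extract_clinical_significance_py_alt
  rw [cssFold, foldB]
  simp only [List.nil_append, pvMinO_none_left, Bool.false_or, loopA_eq, best_eq_chain]
  cases h : pvChain (pvCss annotations) with
  | none =>
    simp only [Option.map_none]
    by_cases he : pvCss annotations = [] <;> simp [he]
  | some b => simp
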